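-- pv_equiv track=rewrite | github.com/mitch-c-miller/advent-2023 | day3/code.py | engine
-- ===== SOURCE A (Python) =====
-- from string import digits
--
-- punctuation = '/+#-%=*&@$'
--
-- def engine(schematic: list[str], gear: bool = False) -> int:
--     def __get_adjacent(i: int, j: int, searchable: str) -> list[tuple[int, int]]:
--         possible_adjacent_coords = [
--             (i - 1, j - 1), (i - 1, j), (i - 1, j + 1),
--             (i, j - 1), (i, j + 1),
--             (i + 1, j - 1), (i + 1, j), (i + 1, j + 1),
--         ]
--         valid_adjacent_coords = list(filter(
--             (lambda coord: 0 <= coord[0] < m and 0 <= coord[1] < n),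
--             possible_adjacent_coords
--         ))
--
--         return set(filter(
--             (lambda coord: schematic[coord[0]][coord[1]] in searchable),
--             valid_adjacent_coords
--         ))
--
--
--     def __get_number(init_i: int, init_j: int) -> (list[tuple[int, int]], int):
--         coords, val = [], ''
--
--         # traverse left
--         i, j = init_i, init_j
--         while 0 <= j < n and schematic[i][j] in digits:
--             if (i,j) not in coords:
--                 coords.insert(0, (i, j))
--                 val = schematic[i][j] + val
--             j -= 1
--
--         # traverse right
--         i, j = init_i, init_j
--         while 0 <= j < n and schematic[i][j] in digits:
--             if (i,j) not in coords:
--                 coords.append((i, j))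
--                 val += schematic[i][j]
--             j += 1
--         return (coords, int(val))
--
--
--     def __part1():
--         i, res = 0, 0
--         while i < m:
--             j = 0
--             while j < n:
--                 if schematic[i][j] in digits:
--                     coords, val = __get_number(i, j)
--                     for num_i, num_j in coords:
--                         if len(__get_adjacent(num_i, num_j, punctuation)) > 0:
--                             res += val
--                             break
--                     i, j = coords[-1]
--                 j += 1
--             i += 1
--         return res
--
--
--     def __part2():
--         i, res = 0, 0
--         while i < m:
--             j = 0
--             while j < n:
--                 if schematic[i][j] == '*':
--                     adjacent_to_gear = __get_adjacent(i, j, digits)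
--                     adjacent_num_coords = set()
--                     adjacent_num_vals = []
--                     for adjacent_i, adjacent_j in adjacent_to_gear:
--                         num_coords, num_val = __get_number(adjacent_i, adjacent_j)
--                         if tuple(num_coords) not in adjacent_num_coords:
--                             adjacent_num_coords.add(tuple(num_coords))
--                             adjacent_num_vals.append(num_val)
--                     if len(adjacent_num_coords) == 2:
--                         temp_val = adjacent_num_vals[0] * adjacent_num_vals[1]
--                         res += (temp_val)
--                 j += 1
--             i += 1
--         return res
--
--
--     m, n = len(schematic), len(schematic[0])
--     if not gear: return __part1()
--     else: return __part2()
-- ===== SOURCE B (Python) =====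
-- from string import digits
--
-- punctuation = '/+#-%=*&@$'
--
--
-- def engine(schematic: list[str], gear: bool = False) -> int:
--     m, n = len(schematic), len(schematic[0])
--
--     def row_runs(row):
--         # maximal digit runs within columns [0, n) as (start, end, value)
--         out, j = [], 0
--         while j < n:
--             if row[j] in digits:
--                 k = j
--                 while k < n and row[k] in digits:
--                     k += 1
--                 out.append((j, k, int(row[j:k])))
--                 j = k
--             else:
--                 j += 1
--         return out
--
--     runs = [row_runs(schematic[i]) for i in range(m)]
--
--     if not gear:
--         # a run is a part number iff its bounding box contains a symbol
--         return sum(v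
--                    for i in range(m)
--                    for (s, e, v) in runs[i]
--                    if any(schematic[r][c] in punctuation
--                           for r in range(max(i - 1, 0), min(i + 2, m))
--                           for c in range(max(s - 1, 0), min(e + 1, n))))
--
--     total = 0
--     for i in range(m):
--         for j in range(n):
--             if schematic[i][j] == '*':
--                 near = [v
--                         for r in range(max(i - 1, 0), min(i + 2, m))
--                         for (s, e, v) in runs[r]
--                         if s <= j + 1 and j <= e]
--                 if len(near) == 2:
--                     total += near[0] * near[1]
--     return total
-- ===== Notes on version B (the rewrite author's own statement) =====
-- stated objective: alternative
-- what changed: B extracts each row's maximal digit runs once as (start,end,value) intervals, then answers part 1 by testing each run's bounding box for a symbol and part 2 by interval-overlap of the 3x3 window around each '*' against the per-row run lists, instead of A's per-cell 8-neighbour searches and left/right re-expansion of the number (__get_number) at every digit cell and gear neighbour.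
import Mathlib
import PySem

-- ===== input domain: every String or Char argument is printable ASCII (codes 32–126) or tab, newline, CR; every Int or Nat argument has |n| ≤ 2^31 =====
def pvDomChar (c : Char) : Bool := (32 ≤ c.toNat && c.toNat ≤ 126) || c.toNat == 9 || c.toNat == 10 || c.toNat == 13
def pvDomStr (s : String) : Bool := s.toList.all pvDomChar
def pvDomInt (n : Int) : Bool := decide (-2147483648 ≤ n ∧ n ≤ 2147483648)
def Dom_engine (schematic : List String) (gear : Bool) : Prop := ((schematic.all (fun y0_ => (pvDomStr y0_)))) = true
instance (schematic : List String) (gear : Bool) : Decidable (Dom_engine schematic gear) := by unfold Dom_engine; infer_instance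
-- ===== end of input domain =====

-- B extracts each row's digit runs once as (start,end,value) intervals and answers part 1 by a
-- bounding-box symbol scan per run and part 2 by interval overlap with the window around each '*',
-- instead of A's per-cell neighbour searches and repeated number re-expansion; return values agree
-- on Pre_ (neither program mutates its arguments).

-- shared character tables and the grid accessor (both Pythons read the same grid cells)
def pvDigits : List Char := ['0','1','2','3','4','5','6','7','8','9']
def pvPunct : List Char := ['/','+','#','-','%','=','*','&','@','$']
def pvGetC (rows : List (List Char)) (i j : Nat) : Char := (rows.getD i []).getD j ' '

-- termination measure facts, cited by name in decreasing_by (keeps the ports' proof terms small)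
theorem pvDecrLeft {j : Int} (h0 : 0 ≤ j) : (j - 1 + 1).toNat < (j + 1).toNat := by omega
theorem pvDecrRight {n j : Int} (h : j < n) : (n - (j + 1)).toNat < (n - j).toNat := by omega
theorem pvDecrJump {n j v : Int} (h : j < n) : (n - max (j + 1) v).toNat < (n - j).toNat := by omega
theorem bDecrStep {n k : Nat} (h : k < n) : n - (k + 1) < n - k := by omega
theorem bDecrTo {n j k : Nat} (h1 : j < k) (h2 : j < n) : n - k < n - j := by omega

-- ===== PORT A =====
def pvOffsets (i j : Int) : List (Int × Int) :=
  [(i-1, j-1), (i-1, j), (i-1, j+1), (i, j-1), (i, j+1), (i+1, j-1), (i+1, j), (i+1, j+1)]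

def pvAdj (rows : List (List Char)) (m n i j : Int) (search : List Char) : List (Int × Int) :=
  PySem.Set.ofList (((pvOffsets i j).filter
      (fun c => decide (0 ≤ c.1 ∧ c.1 < m ∧ 0 ≤ c.2 ∧ c.2 < n))).filter
    (fun c => search.contains (pvGetC rows c.1.toNat c.2.toNat)))

def pvGoLeft (rows : List (List Char)) (n i j : Int)
    (coords : List (Int × Int)) (val : List Char) : List (Int × Int) × List Char :=
  if h : 0 ≤ j ∧ j < n ∧ pvDigits.contains (pvGetC rows i.toNat j.toNat) then
    if (i, j) ∈ coords then pvGoLeft rows n i (j-1) coords val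
    else pvGoLeft rows n i (j-1) ((i, j) :: coords) (pvGetC rows i.toNat j.toNat :: val)
  else (coords, val)
termination_by (j+1).toNat
decreasing_by all_goals exact pvDecrLeft h.1

def pvGoRight (rows : List (List Char)) (n i j : Int)
    (coords : List (Int × Int)) (val : List Char) : List (Int × Int) × List Char :=
  if h : 0 ≤ j ∧ j < n ∧ pvDigits.contains (pvGetC rows i.toNat j.toNat) then
    if (i, j) ∈ coords then pvGoRight rows n i (j+1) coords val
    else pvGoRight rows n i (j+1) (coords ++ [(i, j)]) (val ++ [pvGetC rows i.toNat j.toNat])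
  else (coords, val)
termination_by (n - j).toNat
decreasing_by all_goals exact pvDecrRight h.2.1

def pvGetNumber (rows : List (List Char)) (n i j : Int) : List (Int × Int) × Int :=
  let l := pvGoLeft rows n i j [] []
  let r := pvGoRight rows n i j l.1 l.2
  (r.1, (PySem.Int.ofChars? r.2).getD 0)

def pvP1J (rows : List (List Char)) (m n i j : Int) (res : Int) : Int :=
  if h : j < n then
    if pvDigits.contains (pvGetC rows i.toNat j.toNat) then
      let r := pvGetNumber rows n i j
      let res' := if r.1.any (fun c => decide (0 < (pvAdj rows m n c.1 c.2 pvPunct).length))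
                  then res + r.2 else res
      -- A sets j := coords[-1][1] then j += 1; 'max (j+1)' only secures termination
      -- (A guarantees coords[-1][1] ≥ j on every reachable call)
      pvP1J rows m n i (max (j+1) ((r.1.getLastD (i, j)).2 + 1)) res'
    else pvP1J rows m n i (j+1) res
  else res
termination_by (n - j).toNat
decreasing_by
  · exact pvDecrJump h
  · exact pvDecrRight h

def pvP1I (rows : List (List Char)) (m n i : Int) (res : Int) : Int :=
  if h : i < m then pvP1I rows m n (i+1) (pvP1J rows m n i 0 res) else res
termination_by (m - i).toNat
decreasing_by exact pvDecrRight h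

def pvP2J (rows : List (List Char)) (m n i j : Int) (res : Int) : Int :=
  if h : j < n then
    let res' :=
      if pvGetC rows i.toNat j.toNat = '*' then
        let adj := pvAdj rows m n i j pvDigits
        -- Python folds a set of coord tuples + list of vals; a set is its distinct-element list
        let st := adj.foldl (fun (acc : List (List (Int × Int)) × List Int) c =>
          let nr := pvGetNumber rows n c.1 c.2
          if nr.1 ∈ acc.1 then acc else (acc.1 ++ [nr.1], acc.2 ++ [nr.2])) ([], [])
        if st.1.length = 2 then res + st.2.headD 0 * (st.2.getD 1 0) else res
      else res
    pvP2J rows m n i (j+1) res'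
  else res
termination_by (n - j).toNat
decreasing_by exact pvDecrRight h

def pvP2I (rows : List (List Char)) (m n i : Int) (res : Int) : Int :=
  if h : i < m then pvP2I rows m n (i+1) (pvP2J rows m n i 0 res) else res
termination_by (m - i).toNat
decreasing_by exact pvDecrRight h

def engine (schematic : List String) (gear : Bool) : Int :=
  let rows := schematic.map String.toList
  let m : Int := schematic.length
  -- schematic[0]: headD is only read under Pre_ (schematic ≠ [])
  let n : Int := ((schematic.headD "").toList).length
  if gear then pvP2I rows m n 0 0 else pvP1I rows m n 0 0

-- ===== PORT B =====
def bRunEnd (row : List Char) (n k : Nat) : Nat :=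
  if k < n ∧ pvDigits.contains (row.getD k ' ') then bRunEnd row n (k+1) else k
termination_by n - k
decreasing_by rename_i h; exact bDecrStep h.1

-- termination facts for bRuns (cited by its decreasing_by)
theorem bRunEnd_le (row : List Char) (n k : Nat) : k ≤ bRunEnd row n k := by
  unfold bRunEnd
  split
  · have := bRunEnd_le row n (k+1); omega
  · exact le_refl _
termination_by n - k
decreasing_by omega

theorem lt_bRunEnd (row : List Char) (n k : Nat)
    (h1 : k < n) (h2 : pvDigits.contains (row.getD k ' ')) : k < bRunEnd row n k := by
  unfold bRunEnd
  rw [if_pos ⟨h1, h2⟩]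
  have := bRunEnd_le row n (k+1); omega

-- maximal digit runs of one row, within columns [0, n), as (start, end, value)
def bRuns (row : List Char) (n j : Nat) : List (Nat × Nat × Int) :=
  if h : j < n then
    if hd : pvDigits.contains (row.getD j ' ') then
      let k := bRunEnd row n j
      (j, k, (PySem.Int.ofChars? ((row.drop j).take (k - j))).getD 0) :: bRuns row n k
    else bRuns row n (j+1)
  else []
termination_by n - j
decreasing_by
  · exact bDecrTo (lt_bRunEnd row n j h hd) h
  · exact bDecrStep h

def bRowRuns (rows : List (List Char)) (m n : Nat) : List (List (Nat × Nat × Int)) :=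
  (List.range m).map (fun i => bRuns (rows.getD i []) n 0)

-- does the bounding box of run (s,e) in row i contain a symbol?
def bBox (rows : List (List Char)) (m n i s e : Nat) : Bool :=
  (List.range' (i - 1) (min (i + 2) m - (i - 1))).any (fun r =>
    (List.range' (s - 1) (min (e + 1) n - (s - 1))).any (fun c =>
      pvPunct.contains ((rows.getD r []).getD c ' ')))

-- values of the runs whose interval meets the window [j-1, j+1] of the rows around i
def bNear (rr : List (List (Nat × Nat × Int))) (m i j : Nat) : List Int :=
  (List.range' (i - 1) (min (i + 2) m - (i - 1))).flatMap (fun r =>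
    ((rr.getD r []).filter (fun t => t.1 ≤ j + 1 && j ≤ t.2.1)).map (fun t => t.2.2))

def bP2 (rows : List (List Char)) (m n : Nat) (rr : List (List (Nat × Nat × Int))) : Int :=
  (List.range m).foldl (fun tot i =>
    (List.range n).foldl (fun tot j =>
      if (rows.getD i []).getD j ' ' = '*' then
        let near := bNear rr m i j
        if near.length = 2 then tot + near.headD 0 * near.getD 1 0 else tot
      else tot) tot) 0

def engine_alt (schematic : List String) (gear : Bool) : Int :=
  let rows := schematic.map String.toList
  let m := schematic.length
  let n := ((schematic.headD "").toList).length
  let rr := bRowRuns rows m n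
  if gear then bP2 rows m n rr
  else ((List.range m).flatMap (fun i =>
    ((rr.getD i []).filter (fun t => bBox rows m n i t.1 t.2.1)).map (fun t => t.2.2))).sum

-- ===== PRECONDITION & SPEC =====
-- Pre_ excludes exactly the inputs on which A raises IndexError: the empty grid
-- (schematic[0]) and grids where some row is shorter than the first row (A indexes every
-- row at all columns j < len(schematic[0])).
def Pre_engine (schematic : List String) (gear : Bool) : Prop :=
  schematic ≠ [] ∧ ∀ s ∈ schematic, ((schematic.headD "").toList).length ≤ s.toList.length
instance (schematic : List String) (gear : Bool) : Decidable (Pre_engine schematic gear) := by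
  unfold Pre_engine; infer_instance

def pvWitness_engine : List String × Bool := (["467..114..", "...*......", "..35..633."], true)

def Spec_engine (schematic : List String) (gear : Bool) (out : Int) : Prop :=
  out = engine_alt schematic gear
instance (schematic : List String) (gear : Bool) (out : Int) : Decidable (Spec_engine schematic gear out) := by
  unfold Spec_engine; infer_instance

-- ===== CLAIM (what is proved, stated in full; the proofs are below) =====
def Claim_equal_engine : Prop := ∀ (schematic : List String) (gear : Bool),
  Dom_engine schematic gear → Pre_engine schematic gear →
  Spec_engine schematic gear (engine schematic gear)

-- ===== LEMMAS AND PROOFS =====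

-- ===== run-structure lemmas =====
def altRunStart (row : List Char) (j : Nat) : Nat :=
  if 0 < j ∧ pvDigits.contains (row.getD (j-1) ' ') then altRunStart row (j-1) else j
termination_by j
decreasing_by omega

theorem re_stop {row : List Char} {n k : Nat}
    (h : ¬(k < n ∧ pvDigits.contains (row.getD k ' '))) : bRunEnd row n k = k := by
  unfold bRunEnd; rw [if_neg h]

theorem re_step {row : List Char} {n k : Nat} (h1 : k < n)
    (h2 : pvDigits.contains (row.getD k ' ')) :
    bRunEnd row n k = bRunEnd row n (k+1) := by
  conv_lhs => unfold bRunEnd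
  rw [if_pos ⟨h1, h2⟩]

theorem re_le_n {row : List Char} {n k : Nat} (h : k ≤ n) : bRunEnd row n k ≤ n := by
  unfold bRunEnd
  split
  · next hc => exact re_le_n (by omega)
  · exact h
termination_by n - k
decreasing_by omega

theorem re_dig {row : List Char} {n k : Nat} :
    ∀ t, k ≤ t → t < bRunEnd row n k → pvDigits.contains (row.getD t ' ') := by
  intro t h1 h2
  by_cases hc : k < n ∧ pvDigits.contains (row.getD k ' ')
  · rcases Nat.eq_or_lt_of_le h1 with rfl | hlt
    · exact hc.2
    · exact re_dig t hlt (by rwa [← re_step hc.1 hc.2])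
  · rw [re_stop hc] at h2; omega
termination_by n - k
decreasing_by have := hc.1; omega

theorem re_end {row : List Char} {n k : Nat} :
    ¬(bRunEnd row n k < n ∧ pvDigits.contains (row.getD (bRunEnd row n k) ' ')) := by
  by_cases hc : k < n ∧ pvDigits.contains (row.getD k ' ')
  · rw [re_step hc.1 hc.2]; exact re_end
  · rw [re_stop hc]; exact hc
termination_by n - k
decreasing_by omega

theorem re_chain {row : List Char} {n : Nat} :
    ∀ s t : Nat, s ≤ t → t ≤ n →
    (∀ u, s ≤ u → u < t → pvDigits.contains (row.getD u ' ')) →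
    bRunEnd row n s = bRunEnd row n t := by
  intro s t h1 h2 h3
  rcases Nat.eq_or_lt_of_le h1 with rfl | hlt
  · rfl
  · rw [re_step (by omega) (h3 s (le_refl s) (by omega))]
    exact re_chain (s+1) t (by omega) h2 (fun u hu1 hu2 => h3 u (by omega) hu2)
termination_by s t => t - s
decreasing_by omega

theorem rs_le (row : List Char) (j : Nat) : altRunStart row j ≤ j := by
  unfold altRunStart
  split
  · next hc => have := rs_le row (j-1); omega
  · exact le_refl j
termination_by j
decreasing_by omega

theorem rs_stop {row : List Char} {j : Nat}
    (h : j = 0 ∨ ¬ pvDigits.contains (row.getD (j-1) ' ')) : altRunStart row j = j := by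
  unfold altRunStart
  rw [if_neg]; rintro ⟨h1, h2⟩; rcases h with h | h
  · omega
  · exact h h2

theorem rs_step {row : List Char} {j : Nat} (h1 : 0 < j)
    (h2 : pvDigits.contains (row.getD (j-1) ' ')) :
    altRunStart row j = altRunStart row (j-1) := by
  conv_lhs => unfold altRunStart
  rw [if_pos ⟨h1, h2⟩]

theorem rs_dig {row : List Char} {j : Nat} (hj : pvDigits.contains (row.getD j ' ')) :
    ∀ t, altRunStart row j ≤ t → t ≤ j → pvDigits.contains (row.getD t ' ') := by
  intro t h1 h2
  by_cases hc : 0 < j ∧ pvDigits.contains (row.getD (j-1) ' ')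
  · rcases Nat.eq_or_lt_of_le h2 with rfl | hlt
    · exact hj
    · exact rs_dig hc.2 t (by rwa [← rs_step hc.1 hc.2]) (by omega)
  · rw [rs_stop (by by_cases h0 : j = 0; exact Or.inl h0; exact Or.inr (fun hd => hc ⟨Nat.pos_of_ne_zero h0, hd⟩))] at h1
    have ht : t = j := by omega
    rw [ht]; exact hj
termination_by j
decreasing_by omega

theorem rs_start (row : List Char) (j : Nat) :
    altRunStart row j = 0 ∨ ¬ pvDigits.contains (row.getD (altRunStart row j - 1) ' ') := by
  by_cases hc : 0 < j ∧ pvDigits.contains (row.getD (j-1) ' ')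
  · rw [rs_step hc.1 hc.2]; exact rs_start row (j-1)
  · rw [rs_stop (by by_cases h0 : j = 0; exact Or.inl h0; exact Or.inr (fun hd => hc ⟨Nat.pos_of_ne_zero h0, hd⟩))]
    by_cases h0 : j = 0; exact Or.inl h0; exact Or.inr (fun hd => hc ⟨Nat.pos_of_ne_zero h0, hd⟩)
termination_by j
decreasing_by omega

theorem rs_chain {row : List Char} :
    ∀ s t : Nat, s ≤ t →
    (∀ u, s ≤ u → u < t → pvDigits.contains (row.getD u ' ')) →
    altRunStart row t = altRunStart row s := by
  intro s t h1 h3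
  rcases Nat.eq_or_lt_of_le h1 with rfl | hlt
  · rfl
  · have ht : 0 < t := by omega
    rw [rs_step ht (h3 (t-1) (by omega) (by omega))]
    exact rs_chain s (t-1) (by omega) (fun u hu1 hu2 => h3 u hu1 (by omega))
termination_by s t => t - s
decreasing_by omega

-- ===== goLeft / goRight / getNumber characterization =====
def cellsOf (a s e : Nat) : List (Int × Int) :=
  (List.range' s (e - s)).map (fun (t : Nat) => ((a : Int), (t : Int)))
def charsOf (row : List Char) (s e : Nat) : List Char :=
  (List.range' s (e - s)).map (fun t => row.getD t ' ')

theorem range'_glue {s t e : Nat} (h1 : s ≤ t) (h2 : t ≤ e) :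
    List.range' s (t - s) ++ List.range' t (e - t) = List.range' s (e - s) := by
  have h4 : e - s = (t - s) + (e - t) := by omega
  rw [h4, ← List.range'_append_1]
  congr 2
  omega

theorem range'_cons_of_lt {s e : Nat} (h : s < e) :
    List.range' s (e - s) = s :: List.range' (s+1) (e - (s+1)) := by
  have h1 : e - s = (e - (s+1)) + 1 := by omega
  rw [h1, List.range'_succ]

theorem cellsOf_append {a s t e : Nat} (h1 : s ≤ t) (h2 : t ≤ e) :
    cellsOf a s t ++ cellsOf a t e = cellsOf a s e := by
  unfold cellsOf; rw [← List.map_append, range'_glue h1 h2]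

theorem charsOf_append {row : List Char} {s t e : Nat} (h1 : s ≤ t) (h2 : t ≤ e) :
    charsOf row s t ++ charsOf row t e = charsOf row s e := by
  unfold charsOf; rw [← List.map_append, range'_glue h1 h2]

theorem cellsOf_cons {a s e : Nat} (h : s < e) :
    cellsOf a s e = ((a : Int), (s : Int)) :: cellsOf a (s+1) e := by
  unfold cellsOf; rw [range'_cons_of_lt h, List.map_cons]

theorem charsOf_cons {row : List Char} {s e : Nat} (h : s < e) :
    charsOf row s e = row.getD s ' ' :: charsOf row (s+1) e := by
  unfold charsOf; rw [range'_cons_of_lt h, List.map_cons]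

theorem cellsOf_nil {a s e : Nat} (h : e ≤ s) : cellsOf a s e = [] := by
  unfold cellsOf; rw [Nat.sub_eq_zero_of_le h]; rfl

theorem charsOf_nil {row : List Char} {s e : Nat} (h : e ≤ s) : charsOf row s e = [] := by
  unfold charsOf; rw [Nat.sub_eq_zero_of_le h]; rfl

theorem mem_cellsOf {a s e : Nat} {c : Int × Int} :
    c ∈ cellsOf a s e ↔ ∃ t : Nat, s ≤ t ∧ t < e ∧ c = ((a : Int), (t : Int)) := by
  unfold cellsOf
  simp only [List.mem_map, List.mem_range'_1]
  constructor
  · rintro ⟨t, ⟨h1, h2⟩, rfl⟩; exact ⟨t, h1, by omega, rfl⟩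
  · rintro ⟨t, h1, h2, rfl⟩; exact ⟨t, ⟨h1, by omega⟩, rfl⟩

theorem gr_spec (rows : List (List Char)) {n a : Nat} :
    ∀ (j : Nat) (coords : List (Int × Int)) (val : List Char),
    (∀ c ∈ coords, c.2 < (j : Int)) →
    pvGoRight rows n a j coords val =
      (coords ++ cellsOf a j (bRunEnd (rows.getD a []) n j),
       val ++ charsOf (rows.getD a []) j (bRunEnd (rows.getD a []) n j)) := by
  intro j coords val hco
  by_cases hc : j < n ∧ pvDigits.contains ((rows.getD a []).getD j ' ')
  · rw [pvGoRight, dif_pos (⟨by omega, by exact_mod_cast hc.1, by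
      simp only [Int.toNat_natCast]; exact hc.2⟩ :
        (0:Int) ≤ (j:Int) ∧ (j:Int) < (n:Int) ∧
        pvDigits.contains (pvGetC rows ((a:Int)).toNat ((j:Int)).toNat)),
    if_neg (by intro hmem; have := hco _ hmem; simp at this)]
    simp only [Int.toNat_natCast, pvGetC]
    have hstep : (j:Int) + 1 = ((j+1 : Nat) : Int) := by omega
    rw [hstep, gr_spec rows (j+1) (coords ++ [((a:Int), (j:Int))])
      (val ++ [(rows.getD a []).getD j ' ']) (by
        intro c hcmem
        rcases List.mem_append.mp hcmem with h | h
        · have := hco _ h; push_cast; omega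
        · simp at h; rw [h]; push_cast; omega)]
    have hE : j < bRunEnd (rows.getD a []) n (j+1) := by
      have := lt_bRunEnd (rows.getD a []) n j hc.1 hc.2
      rwa [re_step hc.1 hc.2] at this
    rw [re_step hc.1 hc.2, cellsOf_cons hE, charsOf_cons hE]
    simp
  · rw [pvGoRight, dif_neg (by
      rintro ⟨h1, h2, h3⟩
      simp only [Int.toNat_natCast] at h3
      exact hc ⟨by exact_mod_cast h2, h3⟩)]
    rw [re_stop hc, cellsOf_nil (le_refl j), charsOf_nil (le_refl j),
      List.append_nil, List.append_nil]
termination_by j => n - j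
decreasing_by have := hc.1; omega

theorem gl_spec (rows : List (List Char)) {n a : Nat} :
    ∀ (j : Nat) (coords : List (Int × Int)) (val : List Char),
    j < n → pvDigits.contains ((rows.getD a []).getD j ' ') →
    (∀ c ∈ coords, (j : Int) < c.2) →
    pvGoLeft rows n a j coords val =
      (cellsOf a (altRunStart (rows.getD a []) j) (j+1) ++ coords,
       charsOf (rows.getD a []) (altRunStart (rows.getD a []) j) (j+1) ++ val) := by
  intro j coords val hn hd hco
  rw [pvGoLeft, dif_pos (⟨by omega, by exact_mod_cast hn, by
      simp only [Int.toNat_natCast]; exact hd⟩ :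
        (0:Int) ≤ (j:Int) ∧ (j:Int) < (n:Int) ∧
        pvDigits.contains (pvGetC rows ((a:Int)).toNat ((j:Int)).toNat)),
    if_neg (by intro hmem; have := hco _ hmem; simp at this)]
  simp only [Int.toNat_natCast, pvGetC]
  by_cases hc : 0 < j ∧ pvDigits.contains ((rows.getD a []).getD (j-1) ' ')
  · have hstep : (j:Int) - 1 = ((j-1 : Nat) : Int) := by omega
    rw [hstep, gl_spec rows (j-1) (((a:Int), (j:Int)) :: coords)
      ((rows.getD a []).getD j ' ' :: val) (by omega) hc.2 (by
        intro c hcmem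
        rcases List.mem_cons.mp hcmem with h | h
        · rw [h]; simp; omega
        · have := hco _ h; omega)]
    rw [rs_step hc.1 hc.2]
    have h1 : j - 1 + 1 = j := by omega
    have hsle := rs_le (rows.getD a []) (j-1)
    have hcells : cellsOf a (altRunStart (rows.getD a []) (j-1)) j ++ [((a:Int),(j:Int))]
        = cellsOf a (altRunStart (rows.getD a []) (j-1)) (j+1) := by
      have := cellsOf_append (a := a) (s := altRunStart (rows.getD a []) (j-1))
        (t := j) (e := j+1) (by omega) (by omega)
      rw [← this]; congr 1
      unfold cellsOf
      have : j + 1 - j = 1 := by omega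
      rw [this]; rfl
    have hchars : charsOf (rows.getD a []) (altRunStart (rows.getD a []) (j-1)) j
          ++ [(rows.getD a []).getD j ' ']
        = charsOf (rows.getD a []) (altRunStart (rows.getD a []) (j-1)) (j+1) := by
      have := charsOf_append (row := rows.getD a []) (s := altRunStart (rows.getD a []) (j-1))
        (t := j) (e := j+1) (by omega) (by omega)
      rw [← this]; congr 1
      unfold charsOf
      have : j + 1 - j = 1 := by omega
      rw [this]; rfl
    rw [h1, ← hcells, ← hchars]
    simp
  · have hstop : altRunStart (rows.getD a []) j = j := by
      apply rs_stop
      by_cases h0 : j = 0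
      · exact Or.inl h0
      · exact Or.inr (fun hd' => hc ⟨Nat.pos_of_ne_zero h0, hd'⟩)
    have hone : cellsOf a j (j+1) = [((a:Int),(j:Int))] := by
      unfold cellsOf
      have : j + 1 - j = 1 := by omega
      rw [this]; rfl
    have honec : charsOf (rows.getD a []) j (j+1) = [(rows.getD a []).getD j ' '] := by
      unfold charsOf
      have : j + 1 - j = 1 := by omega
      rw [this]; rfl
    rw [hstop, hone, honec]
    by_cases h0 : j = 0
    · subst h0
      rw [pvGoLeft, dif_neg (by rintro ⟨h1, -, -⟩; omega)]
      simp
    · have hstep : (j:Int) - 1 = ((j-1 : Nat) : Int) := by omega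
      rw [hstep, pvGoLeft, dif_neg (by
        rintro ⟨-, -, h3⟩
        simp only [Int.toNat_natCast, pvGetC] at h3
        exact hc ⟨Nat.pos_of_ne_zero h0, h3⟩)]
      simp
termination_by j => j
decreasing_by omega

theorem getNumber_spec (rows : List (List Char)) {n a b : Nat}
    (hb : b < n) (hd : pvDigits.contains ((rows.getD a []).getD b ' ')) :
    pvGetNumber rows n a b =
      (cellsOf a (altRunStart (rows.getD a []) b) (bRunEnd (rows.getD a []) n b),
       (PySem.Int.ofChars? (charsOf (rows.getD a [])
         (altRunStart (rows.getD a []) b) (bRunEnd (rows.getD a []) n b))).getD 0) := by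
  unfold pvGetNumber
  rw [gl_spec rows b [] [] hb hd (by simp)]
  simp only [List.append_nil]
  -- first goRight step skips (a,b), which is already in coords
  rw [pvGoRight, dif_pos (⟨by omega, by exact_mod_cast hb, by
      simp only [Int.toNat_natCast]; exact hd⟩ :
        (0:Int) ≤ (b:Int) ∧ (b:Int) < (n:Int) ∧
        pvDigits.contains (pvGetC rows ((a:Int)).toNat ((b:Int)).toNat)),
    if_pos (mem_cellsOf.mpr ⟨b, rs_le _ b, by omega, rfl⟩)]
  have hstep : (b:Int) + 1 = ((b+1 : Nat) : Int) := by omega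
  rw [hstep, gr_spec rows (b+1) _ _ (by
    intro c hcmem
    rcases mem_cellsOf.mp hcmem with ⟨t, h1, h2, rfl⟩
    simp; omega)]
  have hsle := rs_le (rows.getD a []) b
  have hE : b + 1 ≤ bRunEnd (rows.getD a []) n b := lt_bRunEnd _ n b hb hd
  rw [← re_step hb hd,
    cellsOf_append (by omega) (by omega), charsOf_append (by omega) (by omega)]


-- ===== digit / length facts =====
theorem dig_lt_length {row : List Char} {t : Nat}
    (h : pvDigits.contains (row.getD t ' ')) : t < row.length := by
  by_contra hge
  rw [List.getD_eq_default _ _ (by omega)] at h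
  exact absurd h (by decide)

theorem runEnd_le_length {row : List Char} {n c : Nat} (hc : c < n)
    (hd : pvDigits.contains (row.getD c ' ')) : bRunEnd row n c ≤ row.length := by
  have he := lt_bRunEnd row n c hc hd
  have := re_dig (row := row) (n := n) (k := c) (bRunEnd row n c - 1) (by omega) (by omega)
  have := dig_lt_length this
  omega

theorem digit_not_punct {ch : Char} (h : pvDigits.contains ch = true) :
    pvPunct.contains ch = false := by
  have hm : ch ∈ pvDigits := by simpa using h
  fin_cases hm <;> decide

theorem charsOf_eq_slice {row : List Char} {s e : Nat} (h1 : s ≤ e) (h2 : e ≤ row.length) :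
    charsOf row s e = (row.drop s).take (e - s) := by
  apply List.ext_getElem
  · simp only [charsOf, List.length_map, List.length_range', List.length_take,
      List.length_drop]
    omega
  · intro i hi1 hi2
    simp only [charsOf, List.getElem_map, List.getElem_range', List.getElem_take,
      List.getElem_drop]
    simp only [charsOf, List.length_map, List.length_range'] at hi1
    rw [List.getD_eq_getElem _ _ (by omega)]
    congr 1
    omega

-- ===== run structure around a member cell =====
theorem run_digits {row : List Char} {n b : Nat} (hb : b < n)
    (hd : pvDigits.contains (row.getD b ' ')) :
    ∀ t, altRunStart row b ≤ t → t < bRunEnd row n b →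
      pvDigits.contains (row.getD t ' ') := by
  intro t h1 h2
  by_cases h : t ≤ b
  · exact rs_dig hd t h1 h
  · exact re_dig t (by omega) h2

theorem runStart_fix (row : List Char) (b : Nat) :
    altRunStart row (altRunStart row b) = altRunStart row b :=
  rs_stop (rs_start row b)

theorem runEnd_runStart {row : List Char} {n b : Nat} (hb : b < n)
    (hd : pvDigits.contains (row.getD b ' ')) :
    bRunEnd row n (altRunStart row b) = bRunEnd row n b :=
  re_chain (altRunStart row b) b (rs_le row b) (by omega)
    (fun u hu1 hu2 => rs_dig hd u hu1 (by omega))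

theorem runStart_of_mem {row : List Char} {n b t : Nat} (hb : b < n)
    (hd : pvDigits.contains (row.getD b ' '))
    (h1 : altRunStart row b ≤ t) (h2 : t < bRunEnd row n b) :
    altRunStart row t = altRunStart row b ∧ bRunEnd row n t = bRunEnd row n b := by
  have hdig : ∀ u, altRunStart row b ≤ u → u < t → pvDigits.contains (row.getD u ' ') :=
    fun u hu1 hu2 => run_digits hb hd u hu1 (by omega)
  have hs : altRunStart row t = altRunStart row b := by
    rw [rs_chain (altRunStart row b) t h1 hdig, runStart_fix]
  have he : bRunEnd row n t = bRunEnd row n b := by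
    have htn : t ≤ n := by have := re_le_n (n := n) (row := row) (k := b) (by omega); omega
    rw [← re_chain (altRunStart row b) t h1 htn hdig, runEnd_runStart hb hd]
  exact ⟨hs, he⟩

-- ===== bRuns characterization =====
theorem bRuns_props (row : List Char) (n : Nat) :
    ∀ (j : Nat),
    (j < n → pvDigits.contains (row.getD j ' ') →
      (j = 0 ∨ ¬ pvDigits.contains (row.getD (j-1) ' '))) →
    ∀ t ∈ bRuns row n j,
    j ≤ t.1 ∧ t.1 < n ∧ pvDigits.contains (row.getD t.1 ' ') ∧
      altRunStart row t.1 = t.1 ∧ t.2.1 = bRunEnd row n t.1 ∧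
      t.2.2 = (PySem.Int.ofChars? ((row.drop t.1).take (t.2.1 - t.1))).getD 0 := by
  intro j hok t ht
  by_cases hj : j < n
  · by_cases hd : pvDigits.contains (row.getD j ' ')
    · rw [bRuns, dif_pos hj, dif_pos hd] at ht
      simp only [List.mem_cons] at ht
      rcases ht with rfl | ht
      · exact ⟨le_refl j, hj, hd, rs_stop (hok hj hd), rfl, rfl⟩
      · obtain ⟨h1, h2, h3, h4, h5, h6⟩ := bRuns_props row n (bRunEnd row n j)
          (fun h1 h2 => absurd ⟨h1, h2⟩ re_end) t ht
        have := lt_bRunEnd row n j hj hd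
        exact ⟨by omega, h2, h3, h4, h5, h6⟩
    · rw [bRuns, dif_pos hj, dif_neg hd] at ht
      obtain ⟨h1, h2, h3, h4, h5, h6⟩ := bRuns_props row n (j+1)
        (fun _ _ => Or.inr (by simpa using hd)) t ht
      exact ⟨by omega, h2, h3, h4, h5, h6⟩
  · rw [bRuns, dif_neg hj] at ht
    exact absurd ht (List.not_mem_nil)
termination_by j => n - j
decreasing_by
  · have := lt_bRunEnd row n j hj hd; omega
  · omega

theorem bRuns_complete (row : List Char) (n : Nat) :
    ∀ (j b : Nat),
    (j < n → pvDigits.contains (row.getD j ' ') →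
      (j = 0 ∨ ¬ pvDigits.contains (row.getD (j-1) ' '))) →
    j ≤ b → b < n → pvDigits.contains (row.getD b ' ') →
    (altRunStart row b, bRunEnd row n b,
      (PySem.Int.ofChars? ((row.drop (altRunStart row b)).take
        (bRunEnd row n b - altRunStart row b))).getD 0) ∈ bRuns row n j := by
  intro j b hok hjb hb hd
  have hj : j < n := by omega
  by_cases hdj : pvDigits.contains (row.getD j ' ')
  · rw [bRuns, dif_pos hj, dif_pos hdj]
    by_cases hbe : b < bRunEnd row n j
    · have hsj : altRunStart row j = j := rs_stop (hok hj hdj)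
      have hmem := runStart_of_mem (n := n) hj hdj (by omega) hbe
      simp only [List.mem_cons]
      exact Or.inl (by rw [hmem.1, hmem.2, hsj])
    · apply List.mem_cons_of_mem
      exact bRuns_complete row n (bRunEnd row n j) b
        (fun h1 h2 => absurd ⟨h1, h2⟩ re_end) (by omega) hb hd
  · rw [bRuns, dif_pos hj, dif_neg hdj]
    have hjb' : j + 1 ≤ b := by rcases Nat.eq_or_lt_of_le hjb with rfl | h; exact absurd hd hdj; omega
    exact bRuns_complete row n (j+1) b
      (fun _ _ => Or.inr (by simpa using hdj)) hjb' hb hd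
termination_by j b => n - j
decreasing_by
  · have := lt_bRunEnd row n j hj hdj; omega
  · omega

theorem bRuns_lb (row : List Char) (n : Nat) :
    ∀ j, ∀ t ∈ bRuns row n j, j ≤ t.1 := by
  intro j t ht
  by_cases hj : j < n
  · by_cases hd : pvDigits.contains (row.getD j ' ')
    · rw [bRuns, dif_pos hj, dif_pos hd] at ht
      rcases List.mem_cons.mp ht with rfl | ht
      · exact le_refl _
      · have := bRuns_lb row n (bRunEnd row n j) t ht
        have := lt_bRunEnd row n j hj hd
        omega
    · rw [bRuns, dif_pos hj, dif_neg hd] at ht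
      have := bRuns_lb row n (j+1) t ht
      omega
  · rw [bRuns, dif_neg hj] at ht
    exact absurd ht (List.not_mem_nil)
termination_by j => n - j
decreasing_by
  · have := lt_bRunEnd row n j hj hd; omega
  · omega

theorem bRuns_sorted (row : List Char) (n : Nat) :
    ∀ j, (bRuns row n j).Pairwise (fun a b => a.1 < b.1) := by
  intro j
  by_cases hj : j < n
  · by_cases hd : pvDigits.contains (row.getD j ' ')
    · rw [bRuns, dif_pos hj, dif_pos hd]
      refine List.Pairwise.cons ?_ (bRuns_sorted row n (bRunEnd row n j))
      intro t ht
      have := bRuns_lb row n (bRunEnd row n j) t ht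
      have := lt_bRunEnd row n j hj hd
      simp only []
      omega
    · rw [bRuns, dif_pos hj, dif_neg hd]
      exact bRuns_sorted row n (j+1)
  · rw [bRuns, dif_neg hj]
    exact List.Pairwise.nil
termination_by j => n - j
decreasing_by
  · have := lt_bRunEnd row n j hj hd; omega
  · omega

theorem bRowRuns_getD (rows : List (List Char)) (m n r : Nat) (hr : r < m) :
    (bRowRuns rows m n).getD r [] = bRuns (rows.getD r []) n 0 := by
  unfold bRowRuns
  rw [List.getD_eq_getElem _ _ (by simpa using hr), List.getElem_map, List.getElem_range]

-- ===== part 1 =====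
theorem any_congr_mem {α : Type} {l : List α} {p q : α → Bool}
    (h : ∀ x ∈ l, p x = q x) : l.any p = l.any q := by
  induction l with
  | nil => rfl
  | cons x t ih =>
    simp only [List.any_cons, h x (by simp), ih (fun y hy => h y (by simp [hy]))]

theorem mem_pvOffsets {i j : Int} {q : Int × Int} :
    q ∈ pvOffsets i j ↔
      (i - 1 ≤ q.1 ∧ q.1 ≤ i + 1 ∧ j - 1 ≤ q.2 ∧ q.2 ≤ j + 1 ∧ ¬(q.1 = i ∧ q.2 = j)) := by
  obtain ⟨x, y⟩ := q
  simp only [pvOffsets, List.mem_cons, List.not_mem_nil, or_false, Prod.mk.injEq, Prod.ext_iff]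
  omega

-- the per-cell adjacency test, as A computes it
def bCond (rows : List (List Char)) (m n : Nat) (cells : List (Int × Int)) : Bool :=
  cells.any (fun c => (pvOffsets c.1 c.2).any (fun q =>
    decide (0 ≤ q.1 ∧ q.1 < (m : Int) ∧ 0 ≤ q.2 ∧ q.2 < (n : Int)) &&
    pvPunct.contains (pvGetC rows q.1.toNat q.2.toNat)))

theorem pvOffsets_nodup (i j : Int) : (pvOffsets i j).Nodup := by
  simp only [pvOffsets, List.nodup_cons, List.mem_cons, List.not_mem_nil, or_false,
    Prod.ext_iff, List.nodup_nil, and_true, not_or]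
  norm_num
  omega

theorem adj_cond (rows : List (List Char)) (m n : Nat) (i j : Int) (search : List Char) :
    decide (0 < (pvAdj rows m n i j search).length) =
      (pvOffsets i j).any (fun q =>
        decide (0 ≤ q.1 ∧ q.1 < (m : Int) ∧ 0 ≤ q.2 ∧ q.2 < (n : Int)) &&
        search.contains (pvGetC rows q.1.toNat q.2.toNat)) := by
  apply Bool.coe_iff_coe.mp
  simp only [decide_eq_true_eq, List.any_eq_true, Bool.and_eq_true, decide_eq_true_eq]
  unfold pvAdj
  rw [List.length_pos_iff_exists_mem]
  constructor
  · rintro ⟨x, hx⟩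
    rw [PySem.Set.mem_ofList, List.mem_filter, List.mem_filter] at hx
    refine ⟨x, hx.1.1, ?_, hx.2⟩
    · simpa using hx.1.2
  · rintro ⟨q, hq, hb, hc⟩
    refine ⟨q, ?_⟩
    rw [PySem.Set.mem_ofList, List.mem_filter, List.mem_filter]
    exact ⟨⟨hq, by simpa using hb⟩, hc⟩

-- A's any-neighbour test over the run's cells equals B's bounding-box scan
theorem box_cond (rows : List (List Char)) (m n i s e : Nat)
    (hi : i < m) (hse : s < e) (hen : e ≤ n)
    (hdig : ∀ t, s ≤ t → t < e → pvDigits.contains ((rows.getD i []).getD t ' ')) :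
    bCond rows m n (cellsOf i s e) = bBox rows m n i s e := by
  apply Bool.coe_iff_coe.mp
  unfold bCond bBox
  simp only [List.any_eq_true, Bool.and_eq_true, decide_eq_true_eq, List.mem_range'_1]
  constructor
  · rintro ⟨c, hc, q, hq, ⟨hb1, hb2, hb3, hb4⟩, hpunct⟩
    obtain ⟨t, ht1, ht2, rfl⟩ := mem_cellsOf.mp hc
    rw [mem_pvOffsets] at hq
    refine ⟨q.1.toNat, ⟨by omega, by omega⟩, q.2.toNat, ⟨by omega, by omega⟩, ?_⟩
    exact hpunct
  · rintro ⟨r, ⟨hr1, hr2⟩, c, ⟨hc1, hc2⟩, hpunct⟩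
    by_cases hrun : r = i ∧ s ≤ c ∧ c < e
    · exfalso
      have := digit_not_punct (hdig c hrun.2.1 hrun.2.2)
      rw [hrun.1] at hpunct
      rw [this] at hpunct
      exact absurd hpunct (by decide)
    · refine ⟨((i:Int), ((min (max c s) (e-1) : Nat) : Int)),
        mem_cellsOf.mpr ⟨min (max c s) (e-1), by omega, by omega, rfl⟩,
        ((r:Int), (c:Int)), ?_, ⟨by omega, by omega, by omega, by omega⟩, ?_⟩
      · rw [mem_pvOffsets]
        simp only [Prod.mk.injEq]
        push_cast
        omega
      · simpa using hpunct

theorem cellsOf_getLastD {a s e : Nat} (h : s < e) (d : Int × Int) :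
    (cellsOf a s e).getLastD d = ((a : Int), ((e-1 : Nat) : Int)) := by
  have h2 : cellsOf a s e = cellsOf a s (e-1) ++ [((a:Int), ((e-1:Nat):Int))] := by
    rw [← cellsOf_append (a := a) (s := s) (t := e-1) (e := e) (by omega) (by omega)]
    congr 1
    unfold cellsOf
    have h3 : e - (e-1) = 1 := by omega
    rw [h3]
    rfl
  rw [h2, List.getLastD_concat]

theorem p1row (rows : List (List Char)) (m n a : Nat) :
    ∀ (j : Nat) (res : Int),
    (j < n → pvDigits.contains ((rows.getD a []).getD j ' ') →
      (j = 0 ∨ ¬ pvDigits.contains ((rows.getD a []).getD (j-1) ' '))) →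
    pvP1J rows m n a j res =
      res + ((bRuns (rows.getD a []) n j).map
        (fun t => if bCond rows m n (cellsOf a t.1 t.2.1) then t.2.2 else 0)).sum := by
  intro j res hok
  by_cases hj : j < n
  · by_cases hd : pvDigits.contains ((rows.getD a []).getD j ' ')
    · have hs : altRunStart (rows.getD a []) j = j := rs_stop (hok hj hd)
      have hje : j < bRunEnd (rows.getD a []) n j := lt_bRunEnd _ n j hj hd
      have hen : bRunEnd (rows.getD a []) n j ≤ n := re_le_n (by omega)
      rw [pvP1J, dif_pos (by exact_mod_cast hj : ((j:Int) < (n:Int))),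
        if_pos (show pvDigits.contains (pvGetC rows ((a:Int)).toNat ((j:Int)).toNat) = true by
          simp only [Int.toNat_natCast]; exact hd)]
      simp only [getNumber_spec rows hj hd, hs]
      have hcond : (cellsOf a j (bRunEnd (rows.getD a []) n j)).any
            (fun c => decide (0 < (pvAdj rows m n c.1 c.2 pvPunct).length))
          = bCond rows m n (cellsOf a j (bRunEnd (rows.getD a []) n j)) := by
        unfold bCond
        exact any_congr_mem (fun c _ => adj_cond rows m n c.1 c.2 pvPunct)
      rw [hcond, cellsOf_getLastD hje]
      have hmax : max ((j:Int)+1) (((bRunEnd (rows.getD a []) n j - 1 : Nat) : Int) + 1)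
          = ((bRunEnd (rows.getD a []) n j : Nat) : Int) := by omega
      rw [hmax]
      rw [p1row rows m n a (bRunEnd (rows.getD a []) n j) _
        (fun h1 h2 => absurd ⟨h1, h2⟩ re_end)]
      conv_rhs => rw [bRuns, dif_pos hj, dif_pos hd]
      rw [List.map_cons, List.sum_cons]
      have hval : (PySem.Int.ofChars? (((rows.getD a []).drop j).take
            (bRunEnd (rows.getD a []) n j - j))).getD 0
          = (PySem.Int.ofChars? (charsOf (rows.getD a []) j
            (bRunEnd (rows.getD a []) n j))).getD 0 := by
        rw [charsOf_eq_slice (by omega) (runEnd_le_length hj hd)]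
      simp only []
      rw [hval]
      split_ifs <;> ring
    · rw [pvP1J, dif_pos (by exact_mod_cast hj : ((j:Int) < (n:Int))),
        if_neg (show ¬ pvDigits.contains (pvGetC rows ((a:Int)).toNat ((j:Int)).toNat) = true by
          simp only [Int.toNat_natCast]; exact hd)]
      have hstep : (j:Int) + 1 = ((j+1 : Nat) : Int) := by omega
      rw [hstep, p1row rows m n a (j+1) res
        (fun _ _ => Or.inr (by simpa using hd))]
      conv_rhs => rw [bRuns, dif_pos hj, dif_neg hd]
  · rw [pvP1J, dif_neg (by exact_mod_cast hj : ¬((j:Int) < (n:Int))),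
      bRuns, dif_neg hj]
    simp
termination_by j => n - j
decreasing_by
  · omega
  · omega

theorem p1outer (rows : List (List Char)) (m n : Nat) :
    ∀ (i : Nat) (res : Int),
    pvP1I rows m n i res =
      res + ((List.range' i (m - i)).map (fun a =>
        ((bRuns (rows.getD a []) n 0).map
          (fun t => if bCond rows m n (cellsOf a t.1 t.2.1) then t.2.2 else 0)).sum)).sum := by
  intro i res
  by_cases hi : i < m
  · rw [pvP1I, dif_pos (by exact_mod_cast hi : ((i:Int) < (m:Int)))]
    have hp := p1row rows m n i 0 res (fun _ _ => Or.inl rfl)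
    simp only [Nat.cast_zero] at hp
    rw [hp]
    have hstep : (i:Int) + 1 = ((i+1 : Nat):Int) := by omega
    rw [hstep, p1outer rows m n (i+1)]
    rw [range'_cons_of_lt hi, List.map_cons, List.sum_cons]
    ring
  · rw [pvP1I, dif_neg (by exact_mod_cast hi : ¬((i:Int) < (m:Int))),
      Nat.sub_eq_zero_of_le (by omega)]
    simp
termination_by i => m - i
decreasing_by omega

theorem sum_filter_map (l : List (Nat × Nat × Int)) (p : Nat × Nat × Int → Bool)
    (v : Nat × Nat × Int → Int) :
    ((l.filter p).map v).sum = (l.map (fun t => if p t then v t else 0)).sum := by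
  induction l with
  | nil => rfl
  | cons x t ih =>
    by_cases hp : p x
    · rw [List.filter_cons_of_pos hp, List.map_cons, List.sum_cons, List.map_cons,
        List.sum_cons, if_pos hp, ih]
    · rw [List.filter_cons_of_neg hp, List.map_cons, List.sum_cons, if_neg hp, ih]
      omega

theorem sum_flatMap_int {α : Type} (l : List α) (f : α → List Int) :
    (l.flatMap f).sum = (l.map (fun a => (f a).sum)).sum := by
  induction l with
  | nil => rfl
  | cons x t ih => simp [List.flatMap_cons, ih]

theorem part1_eq (rows : List (List Char)) (m n : Nat) :
    pvP1I rows m n 0 0 =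
      ((List.range m).flatMap (fun i =>
        (((bRowRuns rows m n).getD i []).filter
          (fun t => bBox rows m n i t.1 t.2.1)).map (fun t => t.2.2))).sum := by
  have hp := p1outer rows m n 0 0
  simp only [Nat.cast_zero] at hp
  rw [hp, sum_flatMap_int, List.range_eq_range']
  simp only [Nat.sub_zero, zero_add]
  congr 1
  apply List.map_congr_left
  intro a ha
  rw [List.mem_range'_1] at ha
  rw [bRowRuns_getD rows m n a (by omega), sum_filter_map]
  congr 1
  apply List.map_congr_left
  intro t ht
  obtain ⟨-, h2, h3, -, h5, -⟩ := bRuns_props (rows.getD a []) n 0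
    (fun _ _ => Or.inl rfl) t ht
  have he := lt_bRunEnd (rows.getD a []) n t.1 h2 h3
  have hen := re_le_n (n := n) (row := rows.getD a []) (k := t.1) (by omega)
  rw [box_cond rows m n a t.1 t.2.1 (by omega) (by omega) (by omega)
    (fun u hu1 hu2 => re_dig (row := rows.getD a []) (n := n) (k := t.1) u hu1 (by omega))]

-- ===== part 2: guards and per-cell fold steps =====
def colsOf (r j : Int) : List (Int × Int) := [(r, j-1), (r, j), (r, j+1)]

def pvGuard (rows : List (List Char)) (m n : Nat) (c : Int × Int) : Bool :=
  pvDigits.contains (pvGetC rows c.1.toNat c.2.toNat) &&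
  decide (0 ≤ c.1 ∧ c.1 < (m : Int) ∧ 0 ≤ c.2 ∧ c.2 < (n : Int))

def aFoldFn (rows : List (List Char)) (n : Nat) :
    (List (List (Int × Int)) × List Int) → (Int × Int) → (List (List (Int × Int)) × List Int) :=
  fun acc c =>
    let nr := pvGetNumber rows (n : Int) c.1 c.2
    if nr.1 ∈ acc.1 then acc else (acc.1 ++ [nr.1], acc.2 ++ [nr.2])

-- the run descriptor reached from cell c, and the runs meeting a window
def runAt (row : List Char) (n c : Nat) : Nat × Nat × Int :=
  (altRunStart row c, bRunEnd row n c,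
    (PySem.Int.ofChars? ((row.drop (altRunStart row c)).take
      (bRunEnd row n c - altRunStart row c))).getD 0)

def winS (row : List Char) (n j : Nat) : List (Nat × Nat × Int) :=
  (bRuns row n 0).filter (fun t => t.1 ≤ j + 1 && j ≤ t.2.1)

theorem pvAdj_digits_eq (rows : List (List Char)) (m n : Nat) (i j : Int) :
    pvAdj rows m n i j pvDigits = (pvOffsets i j).filter (pvGuard rows m n) := by
  rw [pvAdj, List.filter_filter]
  exact PySem.Set.ofList_eq_self_of_nodup _ (List.Nodup.filter _ (pvOffsets_nodup i j))

theorem guard_eval (rows : List (List Char)) (m n r c : Nat) (hr : r < m) (hc : c < n) :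
    pvGuard rows m n ((r:Int), (c:Int)) = pvDigits.contains ((rows.getD r []).getD c ' ') := by
  unfold pvGuard
  simp only [Int.toNat_natCast, pvGetC]
  rw [decide_eq_true (by refine ⟨by omega, by exact_mod_cast hr, by omega, by exact_mod_cast hc⟩ :
    (0:Int) ≤ (r:Int) ∧ (r:Int) < (m:Int) ∧ (0:Int) ≤ (c:Int) ∧ (c:Int) < (n:Int)), Bool.and_true]

theorem guard_false_oob (rows : List (List Char)) (m n : Nat) (c : Int × Int)
    (h : ¬(0 ≤ c.1 ∧ c.1 < (m : Int) ∧ 0 ≤ c.2 ∧ c.2 < (n : Int))) :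
    pvGuard rows m n c = false := by
  unfold pvGuard
  rw [decide_eq_false h, Bool.and_false]

theorem guard_left (rows : List (List Char)) (m n r j : Nat) (hr : r < m) (hj : j < n) :
    pvGuard rows m n ((r:Int), (j:Int)-1)
      = (decide (0 < j) && pvDigits.contains ((rows.getD r []).getD (j-1) ' ')) := by
  by_cases h0 : 0 < j
  · have hc : (j:Int)-1 = ((j-1 : Nat):Int) := by omega
    rw [hc, guard_eval rows m n r (j-1) hr (by omega), decide_eq_true h0, Bool.true_and]
  · have hj0 : j = 0 := by omega
    subst hj0
    rw [guard_false_oob rows m n _ (by simp), decide_eq_false h0, Bool.false_and]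

theorem guard_right (rows : List (List Char)) (m n r j : Nat) (hr : r < m) :
    pvGuard rows m n ((r:Int), (j:Int)+1)
      = (decide (j+1 < n) && pvDigits.contains ((rows.getD r []).getD (j+1) ' ')) := by
  by_cases h1 : j+1 < n
  · have hc : (j:Int)+1 = ((j+1 : Nat):Int) := by omega
    rw [hc, guard_eval rows m n r (j+1) hr h1, decide_eq_true h1, Bool.true_and]
  · rw [guard_false_oob rows m n _ (by push_cast; omega), decide_eq_false h1, Bool.false_and]

theorem cols_oob (rows : List (List Char)) (m n : Nat) (rI j : Int)
    (h : rI < 0 ∨ (m:Int) ≤ rI) :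
    (colsOf rI j).filter (pvGuard rows m n) = [] := by
  apply List.filter_eq_nil_iff.mpr
  intro c hc
  have hfst : c.1 = rI := by
    rcases List.mem_cons.mp hc with rfl | hc
    · rfl
    rcases List.mem_cons.mp hc with rfl | hc
    · rfl
    rcases List.mem_cons.mp hc with rfl | hc
    · rfl
    · exact absurd hc (List.not_mem_nil)
  rw [guard_false_oob rows m n c (by rw [hfst]; omega)]
  simp

theorem aFold_step (rows : List (List Char)) (n r c : Nat) (hc : c < n)
    (hd : pvDigits.contains ((rows.getD r []).getD c ' '))
    (cs : List (List (Int × Int))) (vs : List Int) :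
    aFoldFn rows n (cs, vs) ((r:Int), (c:Int)) =
      (if cellsOf r (altRunStart (rows.getD r []) c) (bRunEnd (rows.getD r []) n c) ∈ cs
       then (cs, vs)
       else (cs ++ [cellsOf r (altRunStart (rows.getD r []) c) (bRunEnd (rows.getD r []) n c)],
             vs ++ [(runAt (rows.getD r []) n c).2.2])) := by
  have hspec := getNumber_spec rows hc hd
  simp only [aFoldFn, hspec, runAt]
  rw [charsOf_eq_slice (by have := rs_le (rows.getD r []) c; have := lt_bRunEnd (rows.getD r []) n c hc hd; omega)
    (runEnd_le_length hc hd)]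

theorem mem_cellsOf_row {r s e : Nat} {p : Int × Int} (h : p ∈ cellsOf r s e) :
    p.1 = (r : Int) := by
  obtain ⟨t, -, -, rfl⟩ := mem_cellsOf.mp h
  rfl

theorem fold_skip (rows : List (List Char)) (n r S E : Nat)
    (cs : List (List (Int × Int))) (vs : List Int)
    (hmem : cellsOf r S E ∈ cs) :
    ∀ L : List Nat,
    (∀ c ∈ L, c < n ∧ pvDigits.contains ((rows.getD r []).getD c ' ') ∧
      altRunStart (rows.getD r []) c = S ∧ bRunEnd (rows.getD r []) n c = E) →
    (L.map (fun (c : Nat) => ((r:Int), (c:Int)))).foldl (aFoldFn rows n) (cs, vs) = (cs, vs) := by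
  intro L hL
  induction L with
  | nil => rfl
  | cons c L ih =>
    obtain ⟨h1, h2, h3, h4⟩ := hL c (List.mem_cons_self)
    rw [List.map_cons, List.foldl_cons, aFold_step rows n r c h1 h2, h3, h4, if_pos hmem]
    exact ih (fun c hc => hL c (List.mem_cons_of_mem _ hc))

theorem fold_runcols (rows : List (List Char)) (n r S E : Nat)
    (cs : List (List (Int × Int))) (vs : List Int)
    (hnmem : cellsOf r S E ∉ cs) :
    ∀ L : List Nat, L ≠ [] →
    (∀ c ∈ L, c < n ∧ pvDigits.contains ((rows.getD r []).getD c ' ') ∧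
      altRunStart (rows.getD r []) c = S ∧ bRunEnd (rows.getD r []) n c = E) →
    (L.map (fun (c : Nat) => ((r:Int), (c:Int)))).foldl (aFoldFn rows n) (cs, vs) =
      (cs ++ [cellsOf r S E],
       vs ++ [(PySem.Int.ofChars? (((rows.getD r []).drop S).take (E - S))).getD 0]) := by
  intro L hne hL
  cases L with
  | nil => exact absurd rfl hne
  | cons c L =>
    obtain ⟨h1, h2, h3, h4⟩ := hL c (List.mem_cons_self)
    rw [List.map_cons, List.foldl_cons, aFold_step rows n r c h1 h2, h3, h4, if_neg hnmem]
    have hval : (runAt (rows.getD r []) n c).2.2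
        = (PySem.Int.ofChars? (((rows.getD r []).drop S).take (E - S))).getD 0 := by
      simp only [runAt, h3, h4]
    rw [hval]
    exact fold_skip rows n r S E _ _ (by simp) L (fun c hc => hL c (List.mem_cons_of_mem _ hc))

-- a filter of a strictly key-sorted list is determined by its member set
theorem filter_eq_target {α : Type} (p : α → Bool) (key : α → Nat) :
    ∀ (l tgt : List α), l.Pairwise (fun a b => key a < key b) →
    tgt.Pairwise (fun a b => key a < key b) →
    (∀ t ∈ tgt, t ∈ l) → (∀ t ∈ l, (p t = true ↔ t ∈ tgt)) →
    l.filter p = tgt := by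
  intro l
  induction l with
  | nil =>
    intro tgt _ _ hsub _
    cases tgt with
    | nil => rfl
    | cons t ts => exact absurd (hsub t (List.mem_cons_self)) (List.not_mem_nil)
  | cons a l ih =>
    intro tgt hl htgt hsub hiff
    have hla := List.pairwise_cons.mp hl
    by_cases hpa : p a = true
    · have hamem : a ∈ tgt := (hiff a (List.mem_cons_self)).mp hpa
      cases tgt with
      | nil => exact absurd hamem (List.not_mem_nil)
      | cons b ts =>
        have htb := List.pairwise_cons.mp htgt
        have hab : a = b := by
          rcases List.mem_cons.mp hamem with h | h
          · exact h
          · have hba : b ∈ a :: l := hsub b (List.mem_cons_self)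
            rcases List.mem_cons.mp hba with heq | hbl
            · exact absurd (heq ▸ htb.1 a h) (lt_irrefl _)
            · have := hla.1 b hbl
              have := htb.1 a h
              omega
        subst hab
        rw [List.filter_cons_of_pos hpa]
        congr 1
        apply ih ts hla.2 htb.2
        · intro t ht
          have := htb.1 t ht
          rcases List.mem_cons.mp (hsub t (List.mem_cons_of_mem _ ht)) with rfl | h
          · omega
          · exact h
        · intro t ht
          rw [hiff t (List.mem_cons_of_mem _ ht)]
          constructor
          · intro h
            rcases List.mem_cons.mp h with rfl | h
            · have := hla.1 t ht; omega
            · exact h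
          · exact fun h => List.mem_cons_of_mem _ h
    · rw [List.filter_cons_of_neg (by simpa using hpa)]
      apply ih tgt hla.2 htgt
      · intro t ht
        rcases List.mem_cons.mp (hsub t ht) with rfl | h
        · exact absurd ((hiff t (List.mem_cons_self)).mpr ht) hpa
        · exact h
      · intro t ht
        exact hiff t (List.mem_cons_of_mem _ ht)

-- the runs meeting the window [j-1, j+1], computed from the three window cells
theorem window_filter (row : List Char) (n j : Nat) (hj : j < n) :
    winS row n j =
      (if 0 < j ∧ pvDigits.contains (row.getD (j-1) ' ') = true ∧
          ¬ pvDigits.contains (row.getD j ' ') = true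
       then [runAt row n (j-1)] else []) ++
      (if pvDigits.contains (row.getD j ' ') = true then [runAt row n j] else []) ++
      (if j+1 < n ∧ pvDigits.contains (row.getD (j+1) ' ') = true ∧
          ¬ pvDigits.contains (row.getD j ' ') = true
       then [runAt row n (j+1)] else []) := by
  have hprops := bRuns_props row n 0 (fun _ _ => Or.inl rfl)
  have hrunAt_mem : ∀ c, c < n → pvDigits.contains (row.getD c ' ') = true →
      runAt row n c ∈ bRuns row n 0 := by
    intro c h1 h2
    exact bRuns_complete row n 0 c (fun _ _ => Or.inl rfl) (Nat.zero_le c) h1 h2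
  apply filter_eq_target _ (fun t => t.1) _ _ (bRuns_sorted row n 0)
  · -- target pairwise
    by_cases hdj : pvDigits.contains (row.getD j ' ') = true
    · rw [if_neg (by tauto), if_pos hdj, if_neg (by tauto)]
      simp
    · rw [if_neg hdj]
      by_cases hd1 : 0 < j ∧ pvDigits.contains (row.getD (j-1) ' ') = true
      · by_cases hd3 : j+1 < n ∧ pvDigits.contains (row.getD (j+1) ' ') = true
        · rw [if_pos ⟨hd1.1, hd1.2, hdj⟩, if_pos ⟨hd3.1, hd3.2, hdj⟩]
          have h1 : altRunStart row (j-1) ≤ j - 1 := rs_le row (j-1)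
          have h2 : altRunStart row (j+1) = j+1 := rs_stop (Or.inr (by simpa using hdj))
          simp only [List.nil_append, List.singleton_append, List.pairwise_cons,
            List.mem_singleton, List.Pairwise.nil, and_true, List.not_mem_nil,
            false_implies, implies_true]
          intro t ht
          rw [ht]
          simp only [runAt]
          omega
        · rw [if_pos ⟨hd1.1, hd1.2, hdj⟩, if_neg (by tauto)]
          simp
      · rw [if_neg (by tauto)]
        by_cases hd3 : j+1 < n ∧ pvDigits.contains (row.getD (j+1) ' ') = true
        · rw [if_pos ⟨hd3.1, hd3.2, hdj⟩]
          simp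
        · rw [if_neg (by tauto)]
          simp
  · -- target ⊆ bRuns
    intro t ht
    rcases List.mem_append.mp ht with ht | htR
    · rcases List.mem_append.mp ht with htL | htM
      · split_ifs at htL with h
        · rw [List.mem_singleton.mp htL]
          exact hrunAt_mem (j-1) (by omega) h.2.1
        · exact absurd htL (List.not_mem_nil)
      · split_ifs at htM with h
        · rw [List.mem_singleton.mp htM]
          exact hrunAt_mem j hj h
        · exact absurd htM (List.not_mem_nil)
    · split_ifs at htR with h
      · rw [List.mem_singleton.mp htR]
        exact hrunAt_mem (j+1) h.1 h.2.1
      · exact absurd htR (List.not_mem_nil)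
  · -- membership in target ↔ overlap
    intro t ht
    obtain ⟨-, hs_n, hs_dig, hs_fix, he_eq, hv_eq⟩ := hprops t ht
    have hse : t.1 < t.2.1 := by
      have := lt_bRunEnd row n t.1 hs_n hs_dig
      omega
    have hmax_left : t.1 = 0 ∨ ¬ pvDigits.contains (row.getD (t.1 - 1) ' ') = true := by
      have := rs_start row t.1
      rwa [hs_fix] at this
    have hmax_right : ¬(t.2.1 < n ∧ pvDigits.contains (row.getD t.2.1 ' ') = true) := by
      rw [he_eq]
      exact re_end
    have ht_eq : ∀ c, c < n → pvDigits.contains (row.getD c ' ') = true →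
        altRunStart row c = t.1 → t = runAt row n c := by
      intro c h1 h2 h3
      have he2 : bRunEnd row n c = t.2.1 := by
        rw [he_eq, ← runEnd_runStart h1 h2, h3]
      simp only [runAt, h3, he2]
      rw [← hv_eq]
    constructor
    · intro hp
      simp only [Bool.and_eq_true, decide_eq_true_eq] at hp
      obtain ⟨hp1, hp2⟩ := hp
      by_cases hdj : pvDigits.contains (row.getD j ' ') = true
      · -- t must be the run through j
        have hsle : t.1 ≤ j := by
          rcases hmax_left with h0 | hnd
          · omega
          · by_contra hgt
            have : t.1 = j+1 := by omega
            rw [this] at hnd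
            simpa using hnd hdj
        have hjlt : j < t.2.1 := by
          by_contra hle
          have : t.2.1 = j := by omega
          rw [this] at hmax_right
          exact hmax_right ⟨hj, hdj⟩
        have hrmem := runStart_of_mem (n := n) (b := t.1) (t := j) hs_n hs_dig
          (by omega) (by omega)
        have := ht_eq j hj hdj (by rw [hrmem.1, hs_fix])
        simp only [List.mem_append, List.mem_singleton]
        rw [if_pos hdj]
        exact Or.inl (Or.inr (by simp [this]))
      · -- t is the run ending at j or starting at j+1
        by_cases hcase : t.2.1 ≤ j
        · have hej : t.2.1 = j := by omega
          have hjpos : 0 < j := by omega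
          have hdig_jm : pvDigits.contains (row.getD (j-1) ' ') = true := by
            have := re_dig (row := row) (n := n) (k := t.1) (j-1) (by omega) (by omega)
            exact this
          have hrmem := runStart_of_mem (n := n) (b := t.1) (t := j-1) hs_n hs_dig
            (by omega) (by omega)
          have := ht_eq (j-1) (by omega) hdig_jm (by rw [hrmem.1, hs_fix])
          simp only [List.mem_append, List.mem_singleton]
          rw [if_pos (⟨hjpos, hdig_jm, hdj⟩ : 0 < j ∧ _ ∧ _)]
          exact Or.inl (Or.inl (by simp [this]))
        · have hsgt : j < t.1 := by
            by_contra hle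
            have : pvDigits.contains (row.getD j ' ') = true :=
              re_dig (row := row) (n := n) (k := t.1) j (by omega) (by omega)
            exact hdj this
          have hs1 : t.1 = j+1 := by omega
          have hj1n : j+1 < n := by omega
          have hdig_jp : pvDigits.contains (row.getD (j+1) ' ') = true := by
            rw [← hs1]; exact hs_dig
          have := ht_eq (j+1) hj1n hdig_jp (by rw [← hs1, hs_fix])
          simp only [List.mem_append, List.mem_singleton]
          rw [if_pos (⟨hj1n, hdig_jp, hdj⟩ : j+1 < n ∧ _ ∧ _)]
          exact Or.inr (by simp [this])
    · intro hmem
      simp only [Bool.and_eq_true, decide_eq_true_eq]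
      rcases List.mem_append.mp hmem with hmem | hmemR
      · rcases List.mem_append.mp hmem with hmemL | hmemM
        · split_ifs at hmemL with h
          · rw [List.mem_singleton.mp hmemL]
            have h1 := rs_le row (j-1)
            have h2 := lt_bRunEnd row n (j-1) (by omega) h.2.1
            simp only [runAt]
            omega
          · exact absurd hmemL (List.not_mem_nil)
        · split_ifs at hmemM with h
          · rw [List.mem_singleton.mp hmemM]
            have h1 := rs_le row j
            have h2 := lt_bRunEnd row n j hj h
            simp only [runAt]
            omega
          · exact absurd hmemM (List.not_mem_nil)
      · split_ifs at hmemR with h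
        · rw [List.mem_singleton.mp hmemR]
          have h1 := rs_le row (j+1)
          have h2 := lt_bRunEnd row n (j+1) h.1 h.2.1
          simp only [runAt]
          omega
        · exact absurd hmemR (List.not_mem_nil)

theorem cells_ne_of_start_ne {r s1 e1 s2 e2 : Nat} (h1 : s1 < e1) (h2 : s2 < e2)
    (hne : s1 ≠ s2) : cellsOf r s1 e1 ≠ cellsOf r s2 e2 := by
  rw [cellsOf_cons h1, cellsOf_cons h2]
  intro h
  have := List.head_eq_of_cons_eq h
  simp only [Prod.ext_iff] at this
  exact hne (by exact_mod_cast this.2)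

theorem filter_cols (rows : List (List Char)) (m n r j : Nat) (hr : r < m) (hj : j < n) :
    (colsOf (r : Int) (j : Int)).filter (pvGuard rows m n)
      = ((if 0 < j ∧ pvDigits.contains ((rows.getD r []).getD (j-1) ' ') = true then [j-1] else [])
          ++ (if pvDigits.contains ((rows.getD r []).getD j ' ') = true then [j] else [])
          ++ (if j+1 < n ∧ pvDigits.contains ((rows.getD r []).getD (j+1) ' ') = true then [j+1] else [])).map
        (fun (c : Nat) => ((r:Int), (c:Int))) := by
  have gL : pvGuard rows m n ((r:Int), (j:Int)-1)
      = decide (0 < j ∧ pvDigits.contains ((rows.getD r []).getD (j-1) ' ') = true) := by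
    rw [guard_left rows m n r j hr hj]
    by_cases h0 : 0 < j <;>
      by_cases hd : pvDigits.contains ((rows.getD r []).getD (j-1) ' ') = true <;>
        simp [h0, hd]
  have gM : pvGuard rows m n ((r:Int), (j:Int))
      = decide (pvDigits.contains ((rows.getD r []).getD j ' ') = true) := by
    rw [guard_eval rows m n r j hr hj]
    by_cases hd : pvDigits.contains ((rows.getD r []).getD j ' ') = true <;> simp [hd]
  have gR : pvGuard rows m n ((r:Int), (j:Int)+1)
      = decide (j+1 < n ∧ pvDigits.contains ((rows.getD r []).getD (j+1) ' ') = true) := by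
    rw [guard_right rows m n r j hr]
    by_cases h1 : j+1 < n <;>
      by_cases hd : pvDigits.contains ((rows.getD r []).getD (j+1) ' ') = true <;>
        simp [h1, hd]
  simp only [colsOf, List.filter_cons, List.filter_nil, gL, gM, gR, decide_eq_true_eq]
  by_cases hA : 0 < j ∧ pvDigits.contains ((rows.getD r []).getD (j-1) ' ') = true <;>
    by_cases hB : pvDigits.contains ((rows.getD r []).getD j ' ') = true <;>
      by_cases hC : j+1 < n ∧ pvDigits.contains ((rows.getD r []).getD (j+1) ' ') = true <;>
        simp only [hA, hB, hC, if_true, if_false, if_pos, if_neg, not_false_iff,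
          List.map_append, List.map_cons, List.map_nil, List.nil_append, List.append_nil] <;>
        simp [hA, hB, hC, Prod.ext_iff] <;>
        omega

theorem rowFold (rows : List (List Char)) (m n r j : Nat) (hr : r < m) (hj : j < n)
    (cs : List (List (Int × Int))) (vs : List Int)
    (hcs : ∀ cl ∈ cs, ∀ p ∈ cl, p.1 ≠ (r : Int)) :
    ((colsOf (r : Int) (j : Int)).filter (pvGuard rows m n)).foldl (aFoldFn rows n) (cs, vs)
      = (cs ++ (winS (rows.getD r []) n j).map (fun t => cellsOf r t.1 t.2.1),
         vs ++ (winS (rows.getD r []) n j).map (fun t => t.2.2)) := by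
  have hgl := guard_left rows m n r j hr hj
  have hgm := guard_eval rows m n r j hr hj
  have hgr := guard_right rows m n r j hr
  have hnotin : ∀ S E : Nat, S < E → cellsOf r S E ∉ cs := by
    intro S E hSE hmem
    have hhead : ((r:Int), (S:Int)) ∈ cellsOf r S E := mem_cellsOf.mpr ⟨S, le_refl _, hSE, rfl⟩
    exact hcs _ hmem _ hhead rfl
  rw [window_filter (rows.getD r []) n j hj]
  by_cases hdj : pvDigits.contains ((rows.getD r []).getD j ' ') = true
  · -- the window cells present all belong to the run through j
    have hS := rs_le (rows.getD r []) j
    have hE := lt_bRunEnd (rows.getD r []) n j hj hdj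
    have hEn := re_le_n (n := n) (row := rows.getD r []) (k := j) (by omega)
    have hcols : (colsOf (r : Int) (j : Int)).filter (pvGuard rows m n)
        = ((if 0 < j ∧ pvDigits.contains ((rows.getD r []).getD (j-1) ' ') = true
            then [j-1] else []) ++ [j] ++
           (if j+1 < n ∧ pvDigits.contains ((rows.getD r []).getD (j+1) ' ') = true
            then [j+1] else [])).map (fun (c : Nat) => ((r:Int), (c:Int))) := by
      rw [filter_cols rows m n r j hr hj, if_pos hdj]
    rw [hcols]
    have hrun : ∀ c ∈ ((if 0 < j ∧ pvDigits.contains ((rows.getD r []).getD (j-1) ' ') = true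
            then [j-1] else []) ++ [j] ++
           (if j+1 < n ∧ pvDigits.contains ((rows.getD r []).getD (j+1) ' ') = true
            then [j+1] else [])),
        c < n ∧ pvDigits.contains ((rows.getD r []).getD c ' ') = true ∧
          altRunStart (rows.getD r []) c = altRunStart (rows.getD r []) j ∧
          bRunEnd (rows.getD r []) n c = bRunEnd (rows.getD r []) n j := by
      intro c hc
      rcases List.mem_append.mp hc with hc | hc
      · rcases List.mem_append.mp hc with hc | hc
        · split_ifs at hc with h
          · rw [List.mem_singleton.mp hc]
            exact ⟨by omega, h.2, (rs_step h.1 h.2).symm, by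
              rw [re_step (show j-1 < n by omega) h.2]
              congr 1
              omega⟩
          · exact absurd hc (List.not_mem_nil)
        · rw [List.mem_singleton.mp hc]
          exact ⟨hj, hdj, rfl, rfl⟩
      · split_ifs at hc with h
        · rw [List.mem_singleton.mp hc]
          refine ⟨h.1, h.2, ?_, ?_⟩
          · rw [rs_step (show 0 < j+1 by omega) (by simpa using hdj)]
            congr 1
          · rw [re_step hj hdj]
        · exact absurd hc (List.not_mem_nil)
    rw [fold_runcols rows n r (altRunStart (rows.getD r []) j) (bRunEnd (rows.getD r []) n j)
      cs vs (hnotin _ _ (by omega)) _ (by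
        intro h
        have : (j : Nat) ∈ ([] : List Nat) := by
          rw [← h]
          simp
        exact absurd this (List.not_mem_nil)) hrun]
    rw [if_neg (by tauto), if_pos hdj, if_neg (by tauto)]
    simp [runAt]
  · -- no run through j: left and right window runs are independent
    have hcols : (colsOf (r : Int) (j : Int)).filter (pvGuard rows m n)
        = ((if 0 < j ∧ pvDigits.contains ((rows.getD r []).getD (j-1) ' ') = true
            then [j-1] else []) ++
           (if j+1 < n ∧ pvDigits.contains ((rows.getD r []).getD (j+1) ' ') = true
            then [j+1] else [])).map (fun (c : Nat) => ((r:Int), (c:Int))) := by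
      rw [filter_cols rows m n r j hr hj, if_neg hdj, List.append_nil]
    rw [hcols, if_neg hdj]
    by_cases hd1 : 0 < j ∧ pvDigits.contains ((rows.getD r []).getD (j-1) ' ') = true
    · have hS1 := rs_le (rows.getD r []) (j-1)
      have hE1 := lt_bRunEnd (rows.getD r []) n (j-1) (by omega) hd1.2
      by_cases hd3 : j+1 < n ∧ pvDigits.contains ((rows.getD r []).getD (j+1) ' ') = true
      · -- two distinct runs, added in order
        have hS3 : altRunStart (rows.getD r []) (j+1) = j+1 :=
          rs_stop (Or.inr (by simpa using hdj))
        have hE3 := lt_bRunEnd (rows.getD r []) n (j+1) hd3.1 hd3.2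
        rw [if_pos hd1, if_pos hd3, if_pos ⟨hd1.1, hd1.2, hdj⟩, if_pos ⟨hd3.1, hd3.2, hdj⟩,
          List.map_append, List.foldl_append]
        rw [fold_runcols rows n r (altRunStart (rows.getD r []) (j-1))
          (bRunEnd (rows.getD r []) n (j-1)) cs vs (hnotin _ _ (by omega)) _ (by simp)
          (by
            intro c hc
            rw [List.mem_singleton.mp hc]
            exact ⟨by omega, hd1.2, rfl, rfl⟩)]
        rw [fold_runcols rows n r (altRunStart (rows.getD r []) (j+1))
          (bRunEnd (rows.getD r []) n (j+1)) _ _ (by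
            intro hmem
            rcases List.mem_append.mp hmem with h | h
            · exact hnotin _ _ (by omega) h
            · rw [List.mem_singleton] at h
              exact cells_ne_of_start_ne (by omega) (by omega)
                (by omega) h.symm) _ (by simp)
          (by
            intro c hc
            rw [List.mem_singleton.mp hc]
            exact ⟨hd3.1, hd3.2, rfl, rfl⟩)]
        simp [runAt]
      · rw [if_pos hd1, if_neg hd3, if_pos ⟨hd1.1, hd1.2, hdj⟩, if_neg (by tauto),
          List.append_nil, List.append_nil]
        rw [fold_runcols rows n r (altRunStart (rows.getD r []) (j-1))
          (bRunEnd (rows.getD r []) n (j-1)) cs vs (hnotin _ _ (by omega)) _ (by simp)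
          (by
            intro c hc
            rw [List.mem_singleton.mp hc]
            exact ⟨by omega, hd1.2, rfl, rfl⟩)]
        simp [runAt]
    · rw [if_neg hd1,
        if_neg (show ¬(0 < j ∧ pvDigits.contains ((rows.getD r []).getD (j-1) ' ') = true ∧
          ¬pvDigits.contains ((rows.getD r []).getD j ' ') = true) by tauto),
        List.nil_append, List.nil_append]
      by_cases hd3 : j+1 < n ∧ pvDigits.contains ((rows.getD r []).getD (j+1) ' ') = true
      · have hE3 := lt_bRunEnd (rows.getD r []) n (j+1) hd3.1 hd3.2
        have hS3 := rs_le (rows.getD r []) (j+1)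
        rw [if_pos hd3, if_pos ⟨hd3.1, hd3.2, hdj⟩]
        rw [fold_runcols rows n r (altRunStart (rows.getD r []) (j+1))
          (bRunEnd (rows.getD r []) n (j+1)) cs vs (hnotin _ _ (by omega)) _ (by simp)
          (by
            intro c hc
            rw [List.mem_singleton.mp hc]
            exact ⟨hd3.1, hd3.2, rfl, rfl⟩)]
        simp [runAt]
      · rw [if_neg hd3,
          if_neg (show ¬(j+1 < n ∧ pvDigits.contains ((rows.getD r []).getD (j+1) ' ') = true ∧
            ¬pvDigits.contains ((rows.getD r []).getD j ' ') = true) by tauto)]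
        simp

theorem cells_of_row {r0 : Nat} {L : List (Nat × Nat × Int)} {cl : List (Int × Int)}
    (h : cl ∈ L.map (fun t => cellsOf r0 t.1 t.2.1)) : ∀ p ∈ cl, p.1 = (r0 : Int) := by
  obtain ⟨t, -, rfl⟩ := List.mem_map.mp h
  exact fun p hp => mem_cellsOf_row hp

theorem star_fold (rows : List (List Char)) (m n i j : Nat) (hi : i < m) (hj : j < n)
    (hstar : pvGetC rows i j = '*') :
    ((pvAdj rows m n (i:Int) (j:Int) pvDigits).foldl (aFoldFn rows n) ([], []))
      = ((List.range' (i-1) (min (i+2) m - (i-1))).flatMap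
           (fun r => (winS (rows.getD r []) n j).map (fun t => cellsOf r t.1 t.2.1)),
         (List.range' (i-1) (min (i+2) m - (i-1))).flatMap
           (fun r => (winS (rows.getD r []) n j).map (fun t => t.2.2))) := by
  rw [pvAdj_digits_eq]
  have hgmid : pvGuard rows m n ((i:Int), (j:Int)) = false := by
    unfold pvGuard
    simp only [Int.toNat_natCast]
    rw [hstar, show pvDigits.contains '*' = false from rfl, Bool.false_and]
  have hmid : List.filter (pvGuard rows m n) [((i:Int), (j:Int)-1), ((i:Int), (j:Int)+1)]
      = List.filter (pvGuard rows m n) (colsOf (i:Int) (j:Int)) := by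
    simp [colsOf, List.filter_cons, List.filter_nil, hgmid]
  have hsplit : pvOffsets (i:Int) (j:Int)
      = (colsOf ((i:Int)-1) (j:Int) ++ [((i:Int), (j:Int)-1), ((i:Int), (j:Int)+1)])
        ++ colsOf ((i:Int)+1) (j:Int) := rfl
  rw [hsplit, List.filter_append, List.filter_append, hmid, List.foldl_append,
    List.foldl_append]
  have hc3 : (i:Int)+1 = (((i+1 : Nat)):Int) := by omega
  by_cases hi0 : i = 0
  · subst hi0
    rw [cols_oob rows m n _ _ (Or.inl (by norm_num))]
    simp only [List.foldl_nil]
    rw [show ((0:Nat):Int) = ((0:Nat):Int) from rfl,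
      rowFold rows m n 0 j hi hj [] [] (by simp)]
    simp only [List.nil_append]
    by_cases hi1 : 0+1 < m
    · rw [hc3, rowFold rows m n (0+1) j hi1 hj _ _ (by
        intro cl hcl p hp heq
        rw [cells_of_row hcl p hp] at heq
        omega)]
      have hcnt : min (0+2) m - (0-1) = 2 := by omega
      rw [hcnt, show List.range' (0-1) 2 = [0, 1] from rfl]
      simp [List.flatMap_cons]
    · rw [cols_oob rows m n _ _ (Or.inr (by push_cast; omega))]
      simp only [List.foldl_nil]
      have hcnt : min (0+2) m - (0-1) = 1 := by omega
      rw [hcnt, show List.range' (0-1) 1 = [0] from rfl]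
      simp [List.flatMap_cons]
  · have hc1 : (i:Int)-1 = (((i-1 : Nat)):Int) := by omega
    rw [hc1, rowFold rows m n (i-1) j (by omega) hj [] [] (by simp)]
    simp only [List.nil_append]
    rw [rowFold rows m n i j hi hj _ _ (by
      intro cl hcl p hp heq
      rw [cells_of_row hcl p hp] at heq
      omega)]
    by_cases hi1 : i+1 < m
    · rw [hc3, rowFold rows m n (i+1) j hi1 hj _ _ (by
        intro cl hcl p hp heq
        rcases List.mem_append.mp hcl with h | h
        · rw [cells_of_row h p hp] at heq
          omega
        · rw [cells_of_row h p hp] at heq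
          omega)]
      have hcnt : min (i+2) m - (i-1) = 3 := by omega
      have hr3 : List.range' (i-1) 3 = [i-1, i, i+1] := by
        have h1 : i-1+1 = i := by omega
        simp [List.range', h1]
      rw [hcnt, hr3]
      simp [List.flatMap_cons]
    · rw [cols_oob rows m n _ _ (Or.inr (by push_cast; omega))]
      simp only [List.foldl_nil]
      have hcnt : min (i+2) m - (i-1) = 2 := by omega
      have hr2 : List.range' (i-1) 2 = [i-1, i] := by
        have h1 : i-1+1 = i := by omega
        simp [List.range', h1]
      rw [hcnt, hr2]
      simp [List.flatMap_cons]

theorem bNear_eq (rows : List (List Char)) (m n i j : Nat) (hi : i < m) :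
    bNear (bRowRuns rows m n) m i j
      = (List.range' (i-1) (min (i+2) m - (i-1))).flatMap
          (fun r => (winS (rows.getD r []) n j).map (fun t => t.2.2)) := by
  unfold bNear
  apply List.flatMap_congr
  intro r hr
  rw [List.mem_range'_1] at hr
  rw [bRowRuns_getD rows m n r (by omega)]
  rfl

theorem flatMap_len_eq {α β γ : Type} (l : List α) (f : α → List β) (g : α → List γ)
    (h : ∀ x ∈ l, (f x).length = (g x).length) :
    (l.flatMap f).length = (l.flatMap g).length := by
  induction l with
  | nil => rfl
  | cons x t ih =>
    simp only [List.flatMap_cons, List.length_append, h x (List.mem_cons_self),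
      ih (fun y hy => h y (List.mem_cons_of_mem _ hy))]

def bBody (rows : List (List Char)) (m n : Nat) (tot : Int) (i j : Nat) : Int :=
  if (rows.getD i []).getD j ' ' = '*' then
    let near := bNear (bRowRuns rows m n) m i j
    if near.length = 2 then tot + near.headD 0 * near.getD 1 0 else tot
  else tot

theorem p2row (rows : List (List Char)) (m n i : Nat) (hi : i < m) :
    ∀ (j : Nat) (res : Int),
    pvP2J rows m n i j res =
      (List.range' j (n - j)).foldl (fun tot j' => bBody rows m n tot i j') res := by
  intro j res
  by_cases hj : j < n
  · rw [pvP2J, dif_pos (by exact_mod_cast hj : ((j:Int) < (n:Int)))]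
    have hstep : (j:Int) + 1 = ((j+1 : Nat) : Int) := by omega
    rw [hstep, p2row rows m n i hi (j+1), range'_cons_of_lt hj, List.foldl_cons]
    congr 1
    simp only [Int.toNat_natCast]
    by_cases hstar : pvGetC rows i j = '*'
    · rw [if_pos hstar]
      unfold bBody
      rw [if_pos (show (rows.getD i []).getD j ' ' = '*' from hstar)]
      have hfn : (fun (acc : List (List (Int × Int)) × List Int) c =>
          let nr := pvGetNumber rows ((n : Nat) : Int) c.1 c.2
          if nr.1 ∈ acc.1 then acc else (acc.1 ++ [nr.1], acc.2 ++ [nr.2]))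
          = aFoldFn rows n := rfl
      rw [hfn, star_fold rows m n i j hi hj hstar, bNear_eq rows m n i j hi]
      rw [flatMap_len_eq (List.range' (i-1) (min (i+2) m - (i-1)))
        (fun r => (winS (rows.getD r []) n j).map (fun t => cellsOf r t.1 t.2.1))
        (fun r => (winS (rows.getD r []) n j).map (fun t => t.2.2))
        (fun x _ => by simp only [List.length_map])]
    · rw [if_neg hstar]
      unfold bBody
      rw [if_neg (show ¬ (rows.getD i []).getD j ' ' = '*' from hstar)]
  · rw [pvP2J, dif_neg (by exact_mod_cast hj : ¬((j:Int) < (n:Int))),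
      Nat.sub_eq_zero_of_le (by omega)]
    rfl
termination_by j => n - j
decreasing_by omega

theorem p2outer (rows : List (List Char)) (m n : Nat) :
    ∀ (i : Nat) (res : Int),
    pvP2I rows m n i res =
      (List.range' i (m - i)).foldl (fun tot i' =>
        (List.range' 0 (n - 0)).foldl (fun tot j' => bBody rows m n tot i' j') tot) res := by
  intro i res
  by_cases hi : i < m
  · rw [pvP2I, dif_pos (by exact_mod_cast hi : ((i:Int) < (m:Int)))]
    have hp := p2row rows m n i hi 0 res
    simp only [Nat.cast_zero] at hp
    have hstep : (i:Int) + 1 = ((i+1 : Nat) : Int) := by omega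
    rw [hp, hstep, p2outer rows m n (i+1), range'_cons_of_lt hi, List.foldl_cons]
  · rw [pvP2I, dif_neg (by exact_mod_cast hi : ¬((i:Int) < (m:Int))),
      Nat.sub_eq_zero_of_le (show m ≤ i by omega)]
    rfl
termination_by i => m - i
decreasing_by omega

theorem part2_eq (rows : List (List Char)) (m n : Nat) :
    pvP2I rows m n 0 0 = bP2 rows m n (bRowRuns rows m n) := by
  have hp := p2outer rows m n 0 0
  simp only [Nat.cast_zero] at hp
  rw [hp, bP2]
  simp only [List.range_eq_range', Nat.sub_zero]
  rfl

-- ===== VERDICT (by name: the statement is the Claim_ definition above) =====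
theorem engine_spec : Claim_equal_engine := by
  unfold Claim_equal_engine
  intro g gear _dom _hpre
  unfold Spec_engine engine engine_alt
  simp only []
  cases gear
  · simp only [Bool.false_eq_true, if_false]
    exact part1_eq (g.map String.toList) g.length ((g.headD "").toList).length
  · simp only [if_true]
    exact part2_eq (g.map String.toList) g.length ((g.headD "").toList).length
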